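-- pv_equiv track=rewrite | github.com/Asmaalafe55/YVC | trgol/ex11-2.py | f20
-- ===== SOURCE A (Python) =====
-- def f20(current,floors):
--     up = []
--     down = []
--     for floor in floors:
--         if floor >= current:
--             up.append(floor)
--         else:
--             down.append(floor)
--     return sorted(up) + sorted(down)[::-1] # [from: to(inc.): steps]
-- ===== SOURCE B (Python) =====
-- def f20(current, floors):
--     # one sort with a composite key: up-group (key False=0) ascending, down-group (True=1) by -x i.e. descending
--     return sorted(floors, key=lambda x: (x < current, -x if x < current else x))
-- ===== Notes on version B (the rewrite author's own statement) =====
-- stated objective: simpler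
-- what changed: B does a single sort with a composite key (x < current, -x if x < current else x) instead of A's partition loop followed by two separate sorts and a reversal.
import Mathlib
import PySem

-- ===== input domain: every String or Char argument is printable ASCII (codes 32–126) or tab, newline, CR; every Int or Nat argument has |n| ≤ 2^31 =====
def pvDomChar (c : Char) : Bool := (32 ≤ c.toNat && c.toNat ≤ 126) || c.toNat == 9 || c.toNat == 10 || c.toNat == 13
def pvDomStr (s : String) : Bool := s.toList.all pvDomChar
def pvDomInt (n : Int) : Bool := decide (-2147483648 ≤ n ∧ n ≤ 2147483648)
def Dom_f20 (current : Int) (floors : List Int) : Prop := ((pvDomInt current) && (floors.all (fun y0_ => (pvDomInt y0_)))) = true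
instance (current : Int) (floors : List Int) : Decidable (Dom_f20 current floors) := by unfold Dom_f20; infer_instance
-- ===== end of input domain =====

-- B replaces A's partition + two sorts + reversal by ONE sort with a composite key (simpler; same asymptotic cost, not claimed faster).

-- ===== PORT A =====
-- A: loop-partition into up/down, then sorted(up) + sorted(down)[::-1]
def f20 (current : Int) (floors : List Int) : List Int :=
  let st := floors.foldl (fun (acc : List Int × List Int) floor =>
    if floor ≥ current then (acc.1 ++ [floor], acc.2) else (acc.1, acc.2 ++ [floor])) ([], [])
  PySem.List.sorted st.1 (fun x => x) false ++
    ((PySem.List.slice? (PySem.List.sorted st.2 (fun x => x) false) none none (-1)).getD [])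

-- ===== PORT B =====
-- B: sorted(floors, key=lambda x: (x < current, -x if x < current else x)); bool keys as 0/1
def f20_alt (current : Int) (floors : List Int) : List Int :=
  PySem.List.sorted2 floors
    (fun x => if x < current then (1 : Int) else 0)
    (fun x => if x < current then -x else x) false

-- ===== PRECONDITION & SPEC =====
def Spec_f20 (current : Int) (floors : List Int) (out : List Int) : Prop := out = f20_alt current floors
instance (current : Int) (floors : List Int) (out : List Int) : Decidable (Spec_f20 current floors out) := by unfold Spec_f20; infer_instance

-- ===== CLAIM (what is proved, stated in full; the proofs are below) =====
def Claim_equal_f20 : Prop := ∀ (current : Int) (floors : List Int), Dom_f20 current floors → Spec_f20 current floors (f20 current floors)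

-- ===== LEMMAS AND PROOFS =====

-- A's partition loop computes the two filters
lemma foldl_pair (current : Int) (l up down : List Int) :
    l.foldl (fun (acc : List Int × List Int) floor =>
      if floor ≥ current then (acc.1 ++ [floor], acc.2) else (acc.1, acc.2 ++ [floor])) (up, down)
    = (up ++ l.filter (fun x => decide (x ≥ current)),
       down ++ l.filter (fun x => decide (¬ x ≥ current))) := by
  induction l generalizing up down with
  | nil => simp
  | cons x xs ih =>
    by_cases h : x ≥ current <;> simp [h, ih, List.filter_cons]

-- the composite key, as one lexicographic key
def pvK (current : Int) (x : Int) : Lex (Int × Int) :=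
  toLex ((if x < current then (1 : Int) else 0), (if x < current then -x else x))

-- sorted2 with the two component keys is sorted with the lexicographic key
lemma sorted2_eq_sorted_lex (current : Int) (xs : List Int) :
    f20_alt current xs = PySem.List.sorted xs (pvK current) false := by
  unfold f20_alt
  simp only [PySem.List.sorted2, PySem.List.sorted, if_neg (by decide : ¬ (false = true))]
  congr 1
  funext acc x
  congr 1
  funext a b
  simp only [pvK, Prod.Lex.lt_iff, ofLex_toLex]
  by_cases h1 : a < current <;> by_cases h2 : b < current <;>
    simp [h1, h2]

-- pvK is injective
lemma pvK_inj (current a b : Int) (h : pvK current a = pvK current b) : a = b := by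
  unfold pvK at h
  have h' := congrArg ofLex h
  simp only [ofLex_toLex, Prod.mk.injEq] at h'
  by_cases h1 : a < current <;> by_cases h2 : b < current <;> simp [h1, h2] at h' <;> omega

theorem f20_spec : Claim_equal_f20 := by
  intro current floors _
  unfold Spec_f20
  rw [sorted2_eq_sorted_lex]
  unfold f20
  simp only [foldl_pair, List.nil_append, PySem.List.slice?_none_none_neg_one, Option.getD_some]
  have hfe : (fun x : Int => decide (¬ x ≥ current)) = (fun x : Int => ! decide (x ≥ current)) := by
    funext x; by_cases h : x ≥ current <;> simp [h]
  rw [hfe]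
  set p : Int → Bool := fun x => decide (x ≥ current) with hp
  set U := PySem.List.sorted (floors.filter p) (fun x => x) false with hU
  set D := PySem.List.sorted (floors.filter (fun x => !p x)) (fun x => x) false with hD
  have hmemU : ∀ x ∈ U, current ≤ x := by
    intro x hx
    rw [hU, PySem.List.mem_sorted] at hx
    have := List.of_mem_filter hx
    simp [hp] at this; omega
  have hmemD : ∀ x ∈ D.reverse, x < current := by
    intro x hx
    rw [List.mem_reverse, hD, PySem.List.mem_sorted] at hx
    have := List.of_mem_filter hx
    simp [hp] at this; omega
  -- permutation
  have hperm : (f20_alt current floors).Perm (U ++ D.reverse) := by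
    rw [sorted2_eq_sorted_lex]
    refine (PySem.List.sorted_perm floors (pvK current) false).trans ?_
    refine ((List.filter_append_perm p floors).symm).trans (List.Perm.append ?_ ?_)
    · exact (PySem.List.sorted_perm _ _ _).symm
    · exact ((PySem.List.sorted_perm _ _ _).symm).trans (List.reverse_perm D).symm
  -- both sides sorted by pvK
  have hsortedB : (PySem.List.sorted floors (pvK current) false).Pairwise
      (fun a b => pvK current a ≤ pvK current b) :=
    PySem.List.sorted_pairwise floors (pvK current)
  have hsortedA : (U ++ D.reverse).Pairwise (fun a b => pvK current a ≤ pvK current b) := by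
    rw [List.pairwise_append]
    refine ⟨?_, ?_, ?_⟩
    · refine (PySem.List.sorted_pairwise (floors.filter p) (fun x => x)).imp_of_mem ?_
      intro a b ha hb hab
      rw [← hU] at ha hb
      have ha' := hmemU a ha; have hb' := hmemU b hb
      simp only [pvK, Prod.Lex.le_iff, ofLex_toLex]
      right
      constructor <;> simp [show ¬ a < current by omega, show ¬ b < current by omega, hab]
    · rw [List.pairwise_reverse]
      refine (PySem.List.sorted_pairwise (floors.filter (fun x => !p x)) (fun x => x)).imp_of_mem ?_
      intro a b ha hb hab
      rw [← hD] at ha hb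
      have ha' : a ∈ D.reverse := by simpa using ha
      have hb' : b ∈ D.reverse := by simpa using hb
      have := hmemD a ha'; have := hmemD b hb'
      simp only [pvK, Prod.Lex.le_iff, ofLex_toLex]
      right
      constructor <;> simp_all
    · intro a ha b hb
      have := hmemU a ha; have := hmemD b hb
      simp only [pvK, Prod.Lex.le_iff, ofLex_toLex]
      left
      simp [show ¬ a < current by omega, show b < current by omega]
  -- conclude by antisymmetry through the injective key
  symm
  refine List.Perm.eq_of_pairwise ?_ hsortedB hsortedA ?_
  · intro a b _ _ h1 h2
    exact pvK_inj current a b (le_antisymm h1 h2)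
  · rw [← sorted2_eq_sorted_lex]; exact hperm
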